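-- pv_equiv track=rewrite | github.com/cchristodoulaki/Pytheas | src/pytheas_utilities.py | generate_case_summary
-- ===== SOURCE A (Python) =====
-- def generate_case_summary(attribute_cases):
--     case_summary = ''
--     attribute_cases = [a for a in attribute_cases if a != '']
--     if len(attribute_cases) > 0:
--         case_summary = attribute_cases[0]
--         for case in attribute_cases:
--             if case_summary != case:
--                 return ''
--     return case_summary
-- ===== SOURCE B (Python) =====
-- def generate_case_summary(attribute_cases):
--     distinct = {a for a in attribute_cases if a != ''}
--     return next(iter(distinct)) if len(distinct) == 1 else ''
-- ===== Notes on version B (the rewrite author's own statement) =====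
-- stated objective: simpler
-- what changed: Replaces the anchor-on-first-element scan with an early return by a set comprehension of distinct non-empty values followed by a cardinality==1 check.
import Mathlib
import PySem

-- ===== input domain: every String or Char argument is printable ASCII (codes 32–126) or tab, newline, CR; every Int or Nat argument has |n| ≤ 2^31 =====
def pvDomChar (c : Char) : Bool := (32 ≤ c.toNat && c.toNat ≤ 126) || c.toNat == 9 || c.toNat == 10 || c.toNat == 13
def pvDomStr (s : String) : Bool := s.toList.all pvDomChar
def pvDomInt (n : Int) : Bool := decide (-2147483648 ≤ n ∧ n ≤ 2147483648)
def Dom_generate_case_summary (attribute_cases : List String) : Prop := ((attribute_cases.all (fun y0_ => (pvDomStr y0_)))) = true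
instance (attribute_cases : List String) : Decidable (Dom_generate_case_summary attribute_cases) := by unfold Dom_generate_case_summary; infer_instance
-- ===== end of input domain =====

-- B replaces A's anchor-and-early-exit scan by a set of distinct non-empty values plus a cardinality check (objective: simpler).

-- ===== PORT A =====
-- the 'for case in attribute_cases' loop with its early 'return '''
def gcsLoop (case_summary : String) : List String → String
  | [] => case_summary
  | case :: rest => if case_summary ≠ case then "" else gcsLoop case_summary rest

def generate_case_summary (attribute_cases : List String) : String :=
  let case_summary := ""
  let ac := attribute_cases.filter (fun a => a ≠ "")
  if _h : ac.length > 0 then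
    gcsLoop (ac.headD "") ac
  else
    case_summary

-- ===== PORT B =====
def generate_case_summary_alt (attribute_cases : List String) : String :=
  let distinct : PySem.Set String := PySem.Set.ofList (attribute_cases.filter (fun a => a ≠ ""))
  if PySem.Set.len distinct == 1 then distinct.headD "" else ""

-- ===== PRECONDITION & SPEC =====
def Spec_generate_case_summary (attribute_cases : List String) (out : String) : Prop := out = generate_case_summary_alt attribute_cases
instance (attribute_cases : List String) (out : String) : Decidable (Spec_generate_case_summary attribute_cases out) := by unfold Spec_generate_case_summary; infer_instance

-- ===== CLAIM (what is proved, stated in full; the proofs are below) =====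
def Claim_equal_generate_case_summary : Prop := ∀ (attribute_cases : List String), Dom_generate_case_summary attribute_cases → Spec_generate_case_summary attribute_cases (generate_case_summary attribute_cases)

-- ===== LEMMAS AND PROOFS =====

theorem gcsLoop_cons (h c : String) (rest : List String) :
    gcsLoop h (c :: rest) = if h ≠ c then "" else gcsLoop h rest := rfl

theorem gcsLoop_all_eq (h : String) (l : List String) (hall : ∀ x ∈ l, x = h) :
    gcsLoop h l = h := by
  induction l with
  | nil => rfl
  | cons c rest ih =>
    have hc : c = h := hall c (by simp)
    rw [gcsLoop_cons, if_neg (by simp [hc])]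
    exact ih (fun x hx => hall x (List.mem_cons_of_mem _ hx))

theorem gcsLoop_ne (h : String) (l : List String) (hne : ∃ x ∈ l, x ≠ h) :
    gcsLoop h l = "" := by
  induction l with
  | nil => simp at hne
  | cons c rest ih =>
    obtain ⟨x, hx, hxh⟩ := hne
    by_cases hc : h = c
    · have hxr : x ∈ rest := by
        rcases List.mem_cons.mp hx with h1 | h1
        · exact absurd (h1.trans hc.symm) hxh
        · exact h1
      rw [gcsLoop_cons, if_neg (by simp [hc])]
      exact ih ⟨x, hxr, hxh⟩
    · rw [gcsLoop_cons, if_pos hc]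

theorem foldl_add_const (h : String) (l : List String) (hall : ∀ x ∈ l, x = h) :
    l.foldl PySem.Set.add [h] = [h] := by
  induction l with
  | nil => rfl
  | cons c rest ih =>
    have hc : c = h := hall c (by simp)
    have step : PySem.Set.add [h] c = [h] := by
      simp [PySem.Set.add, PySem.Set.contains, hc]
    rw [List.foldl_cons, step]
    exact ih (fun x hx => hall x (List.mem_cons_of_mem _ hx))

theorem ofList_cons_foldl (h : String) (l : List String) :
    PySem.Set.ofList (h :: l) = l.foldl PySem.Set.add [h] := by
  rw [PySem.Set.ofList_eq_foldl, List.foldl_cons]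
  congr 1

theorem ofList_all_eq (h : String) (l : List String) (hall : ∀ x ∈ l, x = h) :
    PySem.Set.ofList (h :: l) = [h] := by
  rw [ofList_cons_foldl, foldl_add_const h l hall]

theorem two_le_length_ofList (h x : String) (l : List String)
    (hx : x ∈ h :: l) (hh : h ∈ h :: l) (hne : x ≠ h) :
    2 ≤ (PySem.Set.ofList (h :: l)).length := by
  have hnod : (PySem.Set.ofList (h :: l)).Nodup := PySem.Set.nodup_ofList _
  have hx' : x ∈ PySem.Set.ofList (h :: l) := (PySem.Set.mem_ofList _ _).mpr hx
  have hh' : h ∈ PySem.Set.ofList (h :: l) := (PySem.Set.mem_ofList _ _).mpr hh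
  have hcard : (PySem.Set.ofList (h :: l)).toFinset.card = (PySem.Set.ofList (h :: l)).length :=
    List.toFinset_card_of_nodup hnod
  have : 1 < (PySem.Set.ofList (h :: l)).toFinset.card :=
    Finset.one_lt_card.mpr ⟨x, by simp [hx'], h, by simp [hh'], hne⟩
  omega

-- ===== VERDICT (by name: the statement is the Claim_ definition above) =====
theorem generate_case_summary_spec : Claim_equal_generate_case_summary := by
  intro attribute_cases _
  unfold Spec_generate_case_summary generate_case_summary generate_case_summary_alt
  set ac := attribute_cases.filter (fun a => a ≠ "") with hac
  cases ac with
  | nil => rfl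
  | cons h t =>
    simp only [List.length_cons, List.headD_cons, gt_iff_lt, Nat.zero_lt_succ, dif_pos]
    rw [gcsLoop_cons, if_neg (by simp)]
    by_cases hall : ∀ x ∈ t, x = h
    · rw [gcsLoop_all_eq h t hall, ofList_all_eq h t hall]
      simp [PySem.Set.len]
    · push Not at hall
      obtain ⟨x, hx, hxh⟩ := hall
      rw [gcsLoop_ne h t ⟨x, hx, hxh⟩]
      have h2 : 2 ≤ (PySem.Set.ofList (h :: t)).length :=
        two_le_length_ofList h x t (List.mem_cons_of_mem _ hx) (by simp) hxh
      have hlen : (PySem.Set.ofList (h :: t)).length ≠ 1 := by omega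
      simp [PySem.Set.len, hlen]
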